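-- pv_equiv track=rewrite | github.com/thanever/DID | code/make_parameter.py | _max_multiple
-- ===== SOURCE A (Python) =====
-- from copy import deepcopy
--
-- def _max_multiple(lstt):
--     lst = deepcopy(lstt)
--     s_max = list()
--     s_max.append(max(lst))
--     lst.remove(max(lst))
--     s_min = [9999]
--     while lst != []:
--         if max(lst) == min(s_max) - 1 or max(lst) == min(s_min) - 1:
--             s_min.append(max(lst))
--             lst.remove(max(lst))
--         else:
--             s_max.append(max(lst))
--             lst.remove(max(lst))
--     return s_max
-- ===== SOURCE B (Python) =====
-- def _max_multiple(lstt):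
--     # sort descending once, then one pass tracking the running minimum of each group
--     vs = sorted(lstt, reverse=True)
--     s_max = [vs[0]]
--     mmax = vs[0]      # current min of s_max (values are appended in descending order)
--     mmin = 9999       # current min of the s_min group (starts with sentinel 9999)
--     for v in vs[1:]:
--         if v == mmax - 1 or v == mmin - 1:
--             mmin = min(mmin, v)
--         else:
--             s_max.append(v)
--             mmax = v
--     return s_max
-- ===== Notes on version B (the rewrite author's own statement) =====
-- stated objective: faster
-- what changed: A repeatedly calls max/min/remove on shrinking lists inside a while loop (quadratic); B sorts descending once and makes a single pass tracking the running minimum of each group in two scalars.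
import Mathlib
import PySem

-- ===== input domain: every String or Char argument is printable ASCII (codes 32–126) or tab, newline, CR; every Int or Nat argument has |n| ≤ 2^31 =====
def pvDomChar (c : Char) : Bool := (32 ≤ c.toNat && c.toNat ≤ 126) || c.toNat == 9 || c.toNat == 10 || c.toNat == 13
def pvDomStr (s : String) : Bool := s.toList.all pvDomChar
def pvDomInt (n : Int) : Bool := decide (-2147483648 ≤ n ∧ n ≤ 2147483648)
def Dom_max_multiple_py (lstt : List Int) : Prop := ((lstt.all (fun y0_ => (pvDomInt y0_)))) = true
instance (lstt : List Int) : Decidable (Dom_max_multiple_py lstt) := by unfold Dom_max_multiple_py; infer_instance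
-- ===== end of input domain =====

-- B replaces A's quadratic while loop (max/min/remove on shrinking lists) by one descending
-- sort plus a single pass tracking each group's running minimum in a scalar (objective: faster).

-- ===== PORT A =====
-- the while loop; fuel = number of remaining elements (each iteration removes one element)
def aLoop : Nat → List Int → List Int → List Int → List Int
  | 0, _, s_max, _ => s_max
  | fuel + 1, lst, s_max, s_min =>
    if lst = [] then s_max
    else
      let m := (PySem.List.max? lst (fun x => x)).getD 0
      if m = (PySem.List.min? s_max (fun x => x)).getD 0 - 1 ∨
         m = (PySem.List.min? s_min (fun x => x)).getD 0 - 1 then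
        aLoop fuel ((PySem.List.remove? lst m).getD []) s_max (s_min ++ [m])
      else
        aLoop fuel ((PySem.List.remove? lst m).getD []) (s_max ++ [m]) s_min

def max_multiple_py (lstt : List Int) : List Int :=
  let m0 := (PySem.List.max? lstt (fun x => x)).getD 0
  let lst := (PySem.List.remove? lstt m0).getD []
  aLoop lst.length lst [m0] [9999]

-- ===== PORT B =====
-- single pass over the descending-sorted tail; mmax / mmin are the running group minima
def bLoop : List Int → Int → Int → List Int → List Int
  | [], _, _, s_max => s_max
  | v :: rest, mmax, mmin, s_max =>
    if v = mmax - 1 ∨ v = mmin - 1 then bLoop rest mmax (min mmin v) s_max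
    else bLoop rest v mmin (s_max ++ [v])

def max_multiple_py_alt (lstt : List Int) : List Int :=
  match PySem.List.sorted lstt (fun x => x) true with
  | [] => []   -- unreachable under Pre_ (vs[0] raises in Python on an empty list)
  | v :: rest => bLoop rest v 9999 [v]

-- ===== PRECONDITION & SPEC =====
-- A raises ValueError (max of empty sequence) on the empty list; Pre_ excludes exactly it.
def Pre_max_multiple_py (lstt : List Int) : Prop := lstt ≠ []
instance (lstt : List Int) : Decidable (Pre_max_multiple_py lstt) := by unfold Pre_max_multiple_py; infer_instance
def pvWitness_max_multiple_py : List Int := [5, 4, 2]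

def Spec_max_multiple_py (lstt : List Int) (out : List Int) : Prop := out = max_multiple_py_alt lstt
instance (lstt : List Int) (out : List Int) : Decidable (Spec_max_multiple_py lstt out) := by unfold Spec_max_multiple_py; infer_instance

-- ===== CLAIM (what is proved, stated in full; the proofs are below) =====
def Claim_equal_max_multiple_py : Prop := ∀ (lstt : List Int), Dom_max_multiple_py lstt → Pre_max_multiple_py lstt → Spec_max_multiple_py lstt (max_multiple_py lstt)

-- ===== LEMMAS AND PROOFS =====

-- the value of min over a list extended by one element: min? returns the FIRST minimal
-- element, but with key = id its VALUE is determined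
theorem min?_append_one (s : List Int) (w m : Int)
    (h : PySem.List.min? s (fun x => x) = some w) :
    PySem.List.min? (s ++ [m]) (fun x => x) = some (min w m) := by
  have hne : s ++ [m] ≠ [] := by simp
  obtain ⟨z, hz⟩ : ∃ z, PySem.List.min? (s ++ [m]) (fun x => x) = some z := by
    cases hmin : PySem.List.min? (s ++ [m]) (fun x => x) with
    | none => exact absurd ((PySem.List.min?_eq_none_iff _ _).mp hmin) hne
    | some z => exact ⟨z, rfl⟩
  have hzmem : z ∈ s ++ [m] := PySem.List.min?_mem hz
  have hwmem : w ∈ s := PySem.List.min?_mem h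
  have hzmin : ∀ y ∈ s ++ [m], z ≤ y := PySem.List.min?_isMin hz
  have hwmin : ∀ y ∈ s, w ≤ y := PySem.List.min?_isMin h
  have hzw : z ≤ w := hzmin w (by simp [hwmem])
  have hzm : z ≤ m := hzmin m (by simp)
  rw [hz]
  rcases List.mem_append.mp hzmem with hzs | hzl
  · have : w ≤ z := hwmin z hzs
    have hzw' : z = w := le_antisymm hzw this
    subst hzw'
    simp [min_eq_left hzm]
  · have hzm' : z = m := by simpa using hzl
    subst hzm'
    simp [min_eq_right hzw]

-- sorted(lst, reverse=True) peels off the (first) maximum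
theorem sortedDesc_cons_erase (lst : List Int) (m : Int)
    (hmax : PySem.List.max? lst (fun x => x) = some m) :
    PySem.List.sorted lst (fun x => x) true = m :: PySem.List.sorted (lst.erase m) (fun x => x) true := by
  have hmem : m ∈ lst := PySem.List.max?_mem hmax
  have hperm1 : (m :: PySem.List.sorted (lst.erase m) (fun x => x) true).Perm lst := by
    refine List.Perm.trans (List.Perm.cons m (PySem.List.sorted_perm _ _ _)) ?_
    exact (List.perm_cons_erase hmem).symm
  have hperm2 : (PySem.List.sorted lst (fun x => x) true).Perm
      (m :: PySem.List.sorted (lst.erase m) (fun x => x) true) :=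
    (PySem.List.sorted_perm _ _ _).trans hperm1.symm
  have hs1 : (PySem.List.sorted lst (fun x => x) true).Pairwise (fun a b => b ≤ a) := by
    simpa using PySem.List.sorted_pairwise_rev lst (fun x => x)
  have hs2 : (m :: PySem.List.sorted (lst.erase m) (fun x => x) true).Pairwise (fun a b => b ≤ a) := by
    refine List.Pairwise.cons ?_ (by simpa using PySem.List.sorted_pairwise_rev (lst.erase m) (fun x => x))
    intro b hb
    have : b ∈ lst.erase m := ((PySem.List.sorted_perm (lst.erase m) (fun x => x) true).mem_iff).mp hb
    exact PySem.List.max?_isMax hmax b (List.mem_of_mem_erase this)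
  exact List.Perm.eq_of_pairwise (fun a b _ _ h1 h2 => le_antisymm h2 h1) hs1 hs2 hperm2

theorem min?_singleton (x : Int) : PySem.List.min? [x] (fun y => y) = some x := by
  simp [PySem.List.min?]

-- the while loop of A equals B's single pass over the descending-sorted remainder,
-- provided mmax / mmin are the current minima of s_max / s_min and every remaining
-- element is ≤ mmax
theorem loop_eq (fuel : Nat) :
    ∀ (lst s_max s_min : List Int) (mmax mmin : Int),
      lst.length ≤ fuel →
      (∀ x ∈ lst, x ≤ mmax) →
      PySem.List.min? s_max (fun x => x) = some mmax →
      PySem.List.min? s_min (fun x => x) = some mmin →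
      aLoop fuel lst s_max s_min = bLoop (PySem.List.sorted lst (fun x => x) true) mmax mmin s_max := by
  induction fuel with
  | zero =>
    intro lst s_max s_min mmax mmin hlen _ _ _
    have : lst = [] := List.length_eq_zero_iff.mp (Nat.le_zero.mp hlen)
    subst this
    simp [aLoop, bLoop, PySem.List.sorted]
  | succ fuel ih =>
    intro lst s_max s_min mmax mmin hlen hub hmax hmin
    by_cases hnil : lst = []
    · subst hnil
      simp [aLoop, bLoop, PySem.List.sorted]
    · obtain ⟨m, hm⟩ : ∃ m, PySem.List.max? lst (fun x => x) = some m := by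
        cases h : PySem.List.max? lst (fun x => x) with
        | none => exact absurd ((PySem.List.max?_eq_none_iff _ _).mp h) hnil
        | some m => exact ⟨m, rfl⟩
      have hmmem : m ∈ lst := PySem.List.max?_mem hm
      have hrm : PySem.List.remove? lst m = some (lst.erase m) :=
        PySem.List.remove?_eq_some_erase lst m hmmem
      have hlen' : (lst.erase m).length ≤ fuel := by
        have := List.length_erase_of_mem hmmem
        omega
      have hub' : ∀ x ∈ lst.erase m, x ≤ m :=
        fun x hx => PySem.List.max?_isMax hm x (List.mem_of_mem_erase hx)
      have hsd := sortedDesc_cons_erase lst m hm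
      rw [hsd]
      show aLoop (fuel + 1) lst s_max s_min = _
      rw [aLoop]
      simp only [hnil, if_false, hm, hrm, hmax, hmin, Option.getD_some]
      by_cases hc : m = mmax - 1 ∨ m = mmin - 1
      · rw [if_pos hc]
        rw [bLoop, if_pos hc]
        exact ih (lst.erase m) s_max (s_min ++ [m]) mmax (min mmin m) hlen'
          (fun x hx => hub x (List.mem_of_mem_erase hx)) hmax
          (min?_append_one s_min mmin m hmin)
      · rw [if_neg hc]
        rw [bLoop, if_neg hc]
        have hmle : m ≤ mmax := hub m hmmem
        have : PySem.List.min? (s_max ++ [m]) (fun x => x) = some m := by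
          rw [min?_append_one s_max mmax m hmax, min_eq_right hmle]
        exact ih (lst.erase m) (s_max ++ [m]) s_min m mmin hlen' hub' this hmin

-- ===== VERDICT (by name: the statement is the Claim_ definition above) =====
theorem max_multiple_py_spec : Claim_equal_max_multiple_py := by
  intro lstt _ hpre
  unfold Spec_max_multiple_py max_multiple_py max_multiple_py_alt
  obtain ⟨m0, hm0⟩ : ∃ m0, PySem.List.max? lstt (fun x => x) = some m0 := by
    cases h : PySem.List.max? lstt (fun x => x) with
    | none => exact absurd ((PySem.List.max?_eq_none_iff _ _).mp h) hpre
    | some m0 => exact ⟨m0, rfl⟩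
  have hmem : m0 ∈ lstt := PySem.List.max?_mem hm0
  have hrm : PySem.List.remove? lstt m0 = some (lstt.erase m0) :=
    PySem.List.remove?_eq_some_erase lstt m0 hmem
  have hsd := sortedDesc_cons_erase lstt m0 hm0
  simp only [hm0, hrm, Option.getD_some, hsd]
  exact loop_eq (lstt.erase m0).length (lstt.erase m0) [m0] [9999] m0 9999
    le_rfl (fun x hx => PySem.List.max?_isMax hm0 x (List.mem_of_mem_erase hx))
    (min?_singleton m0) (min?_singleton 9999)
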